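-- pv_equiv track=rewrite | github.com/jdufou1/M1ANDROIDE_COMPLEX | projet/graph.py | GraphDegree
-- ===== SOURCE A (Python) =====
-- def GraphDegree(graph):
--     """(set(int),set(int*int)) -> dict(int:int)
--     Question 2.1.3, on renvoie les degré des sommets du graphe, les degrés sont renvoyés
--     sous forme de dictionnaire ou la clé est l'identifiant du sommet et la valeur est son degré """
--     vertex,edges=graph
--     res={}
--     for v in vertex:
--         cpt=0
--         for e in edges:
--             if v in e:
--                 cpt+=1
--         res[v]=cpt
--     return res
-- ===== SOURCE B (Python) =====
-- def GraphDegree(graph):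
--     vertex, edges = graph
--     res = {v: 0 for v in vertex}
--     for a, b in edges:
--         if a in res:
--             res[a] += 1
--         if b != a and b in res:
--             res[b] += 1
--     return res
-- ===== Notes on version B (the rewrite author's own statement) =====
-- stated objective: faster
-- what changed: Replaces the nested loop (for every vertex, scan all edges) by a zero-initialised dict over the vertices and a single pass over the edges incrementing both endpoints (a self-loop counts once, as A's 'v in e' does).
import Mathlib
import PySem

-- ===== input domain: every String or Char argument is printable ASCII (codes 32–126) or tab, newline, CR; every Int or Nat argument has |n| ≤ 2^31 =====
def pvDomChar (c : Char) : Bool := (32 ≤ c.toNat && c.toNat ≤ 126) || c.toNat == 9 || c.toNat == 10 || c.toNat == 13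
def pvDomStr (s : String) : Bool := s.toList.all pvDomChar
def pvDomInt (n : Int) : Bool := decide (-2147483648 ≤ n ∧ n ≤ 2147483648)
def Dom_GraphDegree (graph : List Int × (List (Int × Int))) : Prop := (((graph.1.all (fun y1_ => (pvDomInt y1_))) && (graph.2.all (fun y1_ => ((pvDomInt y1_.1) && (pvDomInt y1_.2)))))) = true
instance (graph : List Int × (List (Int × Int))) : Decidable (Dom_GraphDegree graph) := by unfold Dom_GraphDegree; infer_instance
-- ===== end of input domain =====

-- B replaces A's nested loop (for every vertex, scan all edges) by a zero-initialised
-- dict over the vertices and a single pass over the edges incrementing both endpoints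
-- (a self-loop increments once, matching A's single 'v in e' test per edge); objective: faster.

-- ===== PORT A =====
-- A's inner loop: 'cpt = 0; for e in edges: if v in e: cpt += 1'
def cntEdges (v : Int) (edges : List (Int × Int)) : Int :=
  edges.foldl (fun cpt e => if v = e.1 ∨ v = e.2 then cpt + 1 else cpt) 0

def GraphDegree (graph : List Int × (List (Int × Int))) : List (Int × Int) :=
  let vertex := graph.1
  let edges := graph.2
  (vertex.foldl (fun res v => res.insert v (cntEdges v edges))
    (PySem.Dict.empty : PySem.Dict Int Int)).items

-- ===== PORT B =====
-- B's first statement per edge (a, b): 'if a in res: res[a] += 1'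
def degStep1 (d : PySem.Dict Int Int) (e : Int × Int) : PySem.Dict Int Int :=
  if d.contains e.1 then d.modify e.1 0 (· + 1) else d

-- B's second statement per edge: 'if b != a and b in res: res[b] += 1'
def degStep (d : PySem.Dict Int Int) (e : Int × Int) : PySem.Dict Int Int :=
  if e.2 ≠ e.1 ∧ (degStep1 d e).contains e.2 then (degStep1 d e).modify e.2 0 (· + 1)
  else degStep1 d e

def GraphDegree_alt (graph : List Int × (List (Int × Int))) : List (Int × Int) :=
  let vertex := graph.1
  let edges := graph.2
  let res0 : PySem.Dict Int Int := vertex.foldl (fun d v => d.insert v 0) PySem.Dict.empty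
  (edges.foldl degStep res0).items

-- ===== PRECONDITION & SPEC =====
def Spec_GraphDegree (graph : List Int × (List (Int × Int))) (out : List (Int × Int)) : Prop := out = GraphDegree_alt graph
instance (graph : List Int × (List (Int × Int))) (out : List (Int × Int)) : Decidable (Spec_GraphDegree graph out) := by unfold Spec_GraphDegree; infer_instance

-- ===== CLAIM (what is proved, stated in full; the proofs are below) =====
def Claim_equal_GraphDegree : Prop := ∀ (graph : List Int × (List (Int × Int))), Dom_GraphDegree graph → Spec_GraphDegree graph (GraphDegree graph)

-- ===== LEMMAS AND PROOFS =====

-- A's outer loop: the value finally stored at k is g k (computed from the key alone)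
theorem getD_foldl_insert_fun (l : List Int) (g : Int → Int) (d : PySem.Dict Int Int) (k : Int) :
    (l.foldl (fun d v => d.insert v (g v)) d).getD k 0 = if k ∈ l then g k else d.getD k 0 := by
  induction l generalizing d with
  | nil => simp
  | cons v t ih =>
    simp only [List.foldl_cons, ih, PySem.Dict.getD_insert, List.mem_cons]
    by_cases hk : k ∈ t <;> by_cases hv : k = v <;> simp [hk, hv]

theorem keys_modify_contained (d : PySem.Dict Int Int) (k : Int) (f : Int → Int)
    (h : d.contains k = true) : (d.modify k 0 f).keys = d.keys := by
  rw [PySem.Dict.keys_modify, PySem.Dict.keys_insert_of_contains]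
  exact h

theorem keys_degStep1 (d : PySem.Dict Int Int) (e : Int × Int) : (degStep1 d e).keys = d.keys := by
  unfold degStep1
  split_ifs with h1
  · exact keys_modify_contained _ _ _ h1
  · rfl

-- one edge step keeps the key list
theorem keys_degStep (d : PySem.Dict Int Int) (e : Int × Int) : (degStep d e).keys = d.keys := by
  unfold degStep
  split_ifs with h2
  · rw [keys_modify_contained _ _ _ h2.2, keys_degStep1]
  · exact keys_degStep1 d e

theorem keys_foldl_degStep (edges : List (Int × Int)) (d : PySem.Dict Int Int) :
    (edges.foldl degStep d).keys = d.keys := by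
  induction edges generalizing d with
  | nil => rfl
  | cons e t ih => simp [List.foldl_cons, ih, keys_degStep]

-- one edge step adds A's indicator 'k in e' to the count at any contained key
theorem getD_degStep (d : PySem.Dict Int Int) (e : Int × Int) (k : Int) (hk : d.contains k = true) :
    (degStep d e).getD k 0 = d.getD k 0 + (if k = e.1 ∨ k = e.2 then 1 else 0) := by
  unfold degStep degStep1
  by_cases hk1 : k = e.1 <;> by_cases hk2 : k = e.2 <;>
    split_ifs <;>
      simp_all [PySem.Dict.getD_modify, PySem.Dict.contains_modify]

-- B's edge loop accumulates exactly A's inner count at every contained key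
theorem getD_foldl_degStep (edges : List (Int × Int)) (d : PySem.Dict Int Int) (k : Int)
    (hk : d.contains k = true) :
    (edges.foldl degStep d).getD k 0 = d.getD k 0 + cntEdges k edges := by
  induction edges generalizing d with
  | nil => simp [cntEdges]
  | cons e t ih =>
    have hk' : (degStep d e).contains k = true := by
      rw [PySem.Dict.contains_iff_mem_keys] at hk ⊢
      rwa [keys_degStep]
    rw [List.foldl_cons, ih (degStep d e) hk', getD_degStep d e k hk]
    have hshift : cntEdges k (e :: t) =
        (if k = e.1 ∨ k = e.2 then (1 : Int) else 0) + cntEdges k t := by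
      simp only [cntEdges, List.foldl_cons]
      by_cases h : k = e.1 ∨ k = e.2
      · simp only [h, if_true, zero_add]
        have h1 := PySem.List.foldl_count_if (fun e => decide (k = e.1 ∨ k = e.2)) t 1
        have h0 := PySem.List.foldl_count_if (fun e => decide (k = e.1 ∨ k = e.2)) t 0
        simp only [decide_eq_true_eq] at h1 h0
        rw [h1, h0]; omega
      · simp [h]
    rw [hshift]; ring

-- ===== VERDICT (by name: the statement is the Claim_ definition above) =====
theorem GraphDegree_spec : Claim_equal_GraphDegree := by
  intro graph _
  unfold Spec_GraphDegree GraphDegree GraphDegree_alt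
  set vertex := graph.1
  set edges := graph.2
  set dA := vertex.foldl (fun res v => res.insert v (cntEdges v edges))
    (PySem.Dict.empty : PySem.Dict Int Int) with hdA
  set d0 : PySem.Dict Int Int := vertex.foldl (fun d v => d.insert v 0) PySem.Dict.empty with hd0
  set dB := edges.foldl degStep d0 with hdB
  have hkA : dA.keys = PySem.Set.ofList vertex := by
    rw [hdA, PySem.Dict.keys_foldl_insert vertex (fun _ v => cntEdges v edges),
      PySem.Dict.keys_empty, PySem.Set.update_nil_left]
  have hk0 : d0.keys = PySem.Set.ofList vertex := by
    rw [hd0, PySem.Dict.keys_foldl_insert vertex (fun _ _ => 0),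
      PySem.Dict.keys_empty, PySem.Set.update_nil_left]
  have hkB : dB.keys = PySem.Set.ofList vertex := by
    rw [hdB, keys_foldl_degStep, hk0]
  have hndA : dA.keys.Nodup := by
    rw [hkA]; exact PySem.Set.nodup_ofList vertex
  have hndB : dB.keys.Nodup := by
    rw [hkB]; exact PySem.Set.nodup_ofList vertex
  rw [PySem.Dict.items_eq_map_keys dA hndA 0, PySem.Dict.items_eq_map_keys dB hndB 0, hkA, hkB]
  apply List.map_congr_left
  intro k hkmem
  have hkv : k ∈ vertex := (PySem.Set.mem_ofList vertex k).mp hkmem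
  have hvA : dA.getD k 0 = cntEdges k edges := by
    rw [hdA, getD_foldl_insert_fun vertex (fun v => cntEdges v edges)]
    simp [hkv]
  have hc0 : d0.contains k = true := by
    rw [PySem.Dict.contains_iff_mem_keys, hk0, PySem.Set.mem_ofList]; exact hkv
  have hv0 : d0.getD k 0 = 0 := by
    rw [hd0, getD_foldl_insert_fun vertex (fun _ => 0)]; simp
  have hvB : dB.getD k 0 = cntEdges k edges := by
    rw [hdB, getD_foldl_degStep edges d0 k hc0, hv0, zero_add]
  rw [hvA, hvB]
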